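-- pv_equiv track=rewrite | github.com/sqz1337/dialogue_segmentation | lib/pipelines/utilities/tiling.py | depth_score
-- ===== SOURCE A (Python) =====
-- def depth_score(timeseries, k):
--     depth_scores = []
--     for i in range(1, len(timeseries) - 1):
--         left, right = i - 1, i + 1
--         while left > 0 and timeseries[left - 1] > timeseries[left]:
--             left -= 1
--         while (
--                 right < (len(timeseries) - 1) and timeseries[right + 1] > timeseries[right]
--         ):
--             right += 1
--         depth_scores.append(
--             (timeseries[right] - timeseries[i]) + (timeseries[left] - timeseries[i])
--         )
--     return [0] * (k + 1) + depth_scores + [0] * (k + 1)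
-- ===== SOURCE B (Python) =====
-- def depth_score(timeseries, k):
--     n = len(timeseries)
--     # L[j]: index reached by climbing left from j while values keep rising leftwards
--     L = []
--     for j in range(n):
--         if j > 0 and timeseries[j - 1] > timeseries[j]:
--             L.append(L[j - 1])
--         else:
--             L.append(j)
--     # R[j]: index reached by climbing right from j while values keep rising rightwards
--     R = [0] * n
--     for j in range(n - 1, -1, -1):
--         if j < n - 1 and timeseries[j + 1] > timeseries[j]:
--             R[j] = R[j + 1]
--         else:
--             R[j] = j
--     scores = [
--         timeseries[R[i + 1]] + timeseries[L[i - 1]] - 2 * timeseries[i]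
--         for i in range(1, n - 1)
--     ]
--     pad = [0] * (k + 1)
--     return pad + scores + pad
-- ===== Notes on version B (the rewrite author's own statement) =====
-- stated objective: faster
-- what changed: Replaces A's per-index left/right while-climb scans with two linear recurrences that precompute every climb endpoint (L[j]=L[j-1] or j, R[j]=R[j+1] or j), followed by a single scoring pass.
import Mathlib
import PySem

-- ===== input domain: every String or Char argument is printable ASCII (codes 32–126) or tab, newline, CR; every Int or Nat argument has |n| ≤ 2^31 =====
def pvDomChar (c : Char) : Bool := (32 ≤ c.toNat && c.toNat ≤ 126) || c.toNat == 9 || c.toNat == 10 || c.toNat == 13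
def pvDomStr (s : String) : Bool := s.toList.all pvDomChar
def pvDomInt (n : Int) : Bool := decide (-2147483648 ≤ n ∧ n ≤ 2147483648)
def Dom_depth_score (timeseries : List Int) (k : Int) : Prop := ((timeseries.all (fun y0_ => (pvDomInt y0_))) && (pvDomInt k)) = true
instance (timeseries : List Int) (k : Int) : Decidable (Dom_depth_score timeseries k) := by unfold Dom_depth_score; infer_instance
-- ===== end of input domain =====

-- B replaces A's per-index left/right while-climbs (quadratic in the worst case) by two
-- linear recurrences precomputing all climb endpoints, then a single scoring pass.

-- ===== PORT A =====
-- the inner 'while left > 0 and ts[left-1] > ts[left]: left -= 1' loop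
-- (indices accessed are always in range in A, so getD is exact)
def climbLeft (ts : List Int) (l : Nat) : Nat :=
  if h : 0 < l ∧ ts.getD (l - 1) 0 > ts.getD l 0 then climbLeft ts (l - 1) else l
termination_by l
decreasing_by omega

-- the inner 'while right < len(ts)-1 and ts[right+1] > ts[right]: right += 1' loop
def climbRight (ts : List Int) (r : Nat) : Nat :=
  if h : r < ts.length - 1 ∧ ts.getD (r + 1) 0 > ts.getD r 0 then climbRight ts (r + 1) else r
termination_by ts.length - r
decreasing_by omega

def depth_score (timeseries : List Int) (k : Int) : List Int :=
  let n := timeseries.length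
  -- for i in range(1, n-1): append (ts[right]-ts[i]) + (ts[left]-ts[i])
  let ds := (List.range' 1 (n - 2)).map (fun i =>
    (timeseries.getD (climbRight timeseries (i + 1)) 0 - timeseries.getD i 0)
      + (timeseries.getD (climbLeft timeseries (i - 1)) 0 - timeseries.getD i 0))
  List.replicate (k + 1).toNat 0 ++ ds ++ List.replicate (k + 1).toNat 0

-- ===== PORT B =====
-- L[j] = L[j-1] if j>0 and ts[j-1] > ts[j] else j, built left to right by appending
def buildL (ts : List Int) : List Nat :=
  (List.range' 0 ts.length).foldl
    (fun acc j => acc ++ [if 0 < j ∧ ts.getD (j - 1) 0 > ts.getD j 0 then acc.getD (j - 1) 0 else j])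
    []

-- R[j] = R[j+1] if j<n-1 and ts[j+1] > ts[j] else j, built right to left by consing
def buildR (ts : List Int) : List Nat :=
  (List.range' 0 ts.length).reverse.foldl
    (fun acc j => (if j < ts.length - 1 ∧ ts.getD (j + 1) 0 > ts.getD j 0 then acc.headD 0 else j) :: acc)
    []

def depth_score_alt (timeseries : List Int) (k : Int) : List Int :=
  let n := timeseries.length
  let L := buildL timeseries
  let R := buildR timeseries
  let scores := (List.range' 1 (n - 2)).map (fun i =>
    timeseries.getD (R.getD (i + 1) 0) 0 + timeseries.getD (L.getD (i - 1) 0) 0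
      - 2 * timeseries.getD i 0)
  let pad := List.replicate (k + 1).toNat 0
  pad ++ scores ++ pad

-- ===== PRECONDITION & SPEC =====
def Spec_depth_score (timeseries : List Int) (k : Int) (out : List Int) : Prop := out = depth_score_alt timeseries k
instance (timeseries : List Int) (k : Int) (out : List Int) : Decidable (Spec_depth_score timeseries k out) := by unfold Spec_depth_score; infer_instance

-- ===== CLAIM (what is proved, stated in full; the proofs are below) =====
def Claim_equal_depth_score : Prop := ∀ (timeseries : List Int) (k : Int), Dom_depth_score timeseries k → Spec_depth_score timeseries k (depth_score timeseries k)

-- ===== LEMMAS AND PROOFS =====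

-- the partial left-to-right fold builds [climbLeft 0, …, climbLeft (m-1)]
lemma buildL_partial (ts : List Int) (m : Nat) :
    ((List.range' 0 m).foldl
      (fun acc j => acc ++ [if 0 < j ∧ ts.getD (j - 1) 0 > ts.getD j 0 then acc.getD (j - 1) 0 else j])
      []).length = m ∧
    ∀ j < m, ((List.range' 0 m).foldl
      (fun acc j => acc ++ [if 0 < j ∧ ts.getD (j - 1) 0 > ts.getD j 0 then acc.getD (j - 1) 0 else j])
      []).getD j 0 = climbLeft ts j := by
  induction m with
  | zero => simp
  | succ m ih =>
    obtain ⟨hlen, hget⟩ := ih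
    rw [List.range'_concat, List.foldl_append]
    simp only [Nat.one_mul, Nat.zero_add]
    set l := (List.range' 0 m).foldl
      (fun acc j => acc ++ [if 0 < j ∧ ts.getD (j - 1) 0 > ts.getD j 0 then acc.getD (j - 1) 0 else j])
      [] with hl
    simp only [List.foldl_cons, List.foldl_nil]
    constructor
    · simp [hlen]
    · intro j hj
      rcases Nat.lt_succ_iff_lt_or_eq.mp hj with h | h
      · rw [List.getD_append _ _ _ _ (by omega)]
        exact hget j h
      · subst h
        have : (l ++ [if 0 < j ∧ ts.getD (j - 1) 0 > ts.getD j 0 then l.getD (j - 1) 0 else j]).getD j 0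
            = (if 0 < j ∧ ts.getD (j - 1) 0 > ts.getD j 0 then l.getD (j - 1) 0 else j) := by
          rw [List.getD_eq_getElem?_getD, List.getElem?_append_right (by omega), hlen]
          simp
        rw [this, climbLeft]
        split_ifs with h
        · exact hget (j - 1) (by omega)
        · rfl

lemma buildL_getD (ts : List Int) (j : Nat) (hj : j < ts.length) :
    (buildL ts).getD j 0 = climbLeft ts j :=
  (buildL_partial ts ts.length).2 j hj

-- the partial right-to-left fold over [n-1, …, n-m] builds [climbRight (n-m), …, climbRight (n-1)]
lemma buildR_partial (ts : List Int) (m : Nat) (hm : m ≤ ts.length) :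
    (((List.range' (ts.length - m) m).reverse.foldl
      (fun acc j => (if j < ts.length - 1 ∧ ts.getD (j + 1) 0 > ts.getD j 0 then acc.headD 0 else j) :: acc)
      []).length = m) ∧
    ∀ i < m, ((List.range' (ts.length - m) m).reverse.foldl
      (fun acc j => (if j < ts.length - 1 ∧ ts.getD (j + 1) 0 > ts.getD j 0 then acc.headD 0 else j) :: acc)
      []).getD i 0 = climbRight ts (ts.length - m + i) := by
  induction m with
  | zero => simp
  | succ m ih =>
    obtain ⟨hlen, hget⟩ := ih (by omega)
    have hrange : List.range' (ts.length - (m + 1)) (m + 1)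
        = (ts.length - (m + 1)) :: List.range' (ts.length - m) m := by
      have h1 : ts.length - (m + 1) + 1 = ts.length - m := by omega
      rw [List.range'_succ, h1]
    rw [hrange]
    simp only [List.reverse_cons, List.foldl_append, List.foldl_cons, List.foldl_nil]
    set l := (List.range' (ts.length - m) m).reverse.foldl
      (fun acc j => (if j < ts.length - 1 ∧ ts.getD (j + 1) 0 > ts.getD j 0 then acc.headD 0 else j) :: acc)
      [] with hl
    refine ⟨by rw [List.length_cons, hlen], ?_⟩
    intro i hi
    cases i with
    | zero =>
      simp only [Nat.add_zero, List.getD_cons_zero]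
      rw [climbRight]
      by_cases h : ts.length - (m + 1) < ts.length - 1 ∧
          ts.getD (ts.length - (m + 1) + 1) 0 > ts.getD (ts.length - (m + 1)) 0
      · rw [if_pos h, dif_pos h]
        have hm1 : 1 ≤ m := by omega
        have hhead : l.headD 0 = l.getD 0 0 := by
          rw [List.getD_eq_getElem?_getD, ← List.head?_eq_getElem?, List.headD_eq_head?]
        rw [hhead, hget 0 (by omega)]
        congr 1
        omega
      · rw [if_neg h, dif_neg h]
    | succ i' =>
      rw [List.getD_cons_succ, hget i' (by omega)]
      congr 1
      omega

lemma buildR_getD (ts : List Int) (j : Nat) (hj : j < ts.length) :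
    (buildR ts).getD j 0 = climbRight ts j := by
  have h := (buildR_partial ts ts.length le_rfl).2 j hj
  simpa [buildR] using h

-- ===== VERDICT (by name: the statement is the Claim_ definition above) =====
theorem depth_score_spec : Claim_equal_depth_score := by
  intro ts k _
  simp only [Spec_depth_score, depth_score, depth_score_alt]
  congr 1
  congr 1
  apply List.map_congr_left
  intro i hi
  have hmem := List.mem_range'_1.mp hi
  have h1 : i + 1 < ts.length := by omega
  have h2 : i - 1 < ts.length := by omega
  rw [buildR_getD ts (i + 1) h1, buildL_getD ts (i - 1) h2]
  ring
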